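-- pv_equiv track=rewrite | github.com/iain801/uncertainty-cot | benchmark.py | extract_boxed_content
-- ===== SOURCE A (Python) =====
-- def extract_boxed_content(text):
--     """Extract content from \boxed{} expressions, handling nested braces correctly."""
--     results = []
--     i = 0
--     while i < len(text):
--         # Find the start of a boxed expression
--         boxed_start = text.find("\\boxed{", i)
--         if boxed_start == -1:
--             break
--
--         # Find the matching closing brace
--         brace_start = boxed_start + len("\\boxed{")
--         brace_level = 1
--         brace_end = brace_start
--
--         while brace_level > 0 and brace_end < len(text):
--             if text[brace_end] == '{':
--                 brace_level += 1
--             elif text[brace_end] == '}':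
--                 brace_level -= 1
--             brace_end += 1
--
--         if brace_level == 0:
--             # Successfully found the matching closing brace
--             content = text[brace_start:brace_end-1]
--             results.append(content)
--
--         # Move past this boxed expression
--         i = brace_end
--
--     return results
-- ===== SOURCE B (Python) =====
-- MARKER = "\\boxed{"
--
-- def extract_boxed_content(text):
--     """Single left-to-right state-machine pass: a brace-depth counter plus a
--     buffer of the current box's content (depth 0 = outside any box)."""
--     results = []
--     i = 0
--     n = len(text)
--     depth = 0
--     buf = []
--     while i < n:
--         if depth == 0:
--             if text.startswith(MARKER, i):
--                 depth = 1
--                 buf = []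
--                 i += len(MARKER)
--             else:
--                 i += 1
--         else:
--             c = text[i]
--             if c == '{':
--                 depth += 1
--             elif c == '}':
--                 depth -= 1
--             if depth == 0:
--                 results.append(''.join(buf))
--             else:
--                 buf.append(c)
--             i += 1
--     return results
-- ===== Notes on version B (the rewrite author's own statement) =====
-- stated objective: alternative
-- what changed: Replaces A's find('\boxed{')-then-inner-brace-matching-loop structure with a single left-to-right state-machine pass that maintains a brace-depth counter and a content buffer (depth 0 = outside a box).
import Mathlib
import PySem

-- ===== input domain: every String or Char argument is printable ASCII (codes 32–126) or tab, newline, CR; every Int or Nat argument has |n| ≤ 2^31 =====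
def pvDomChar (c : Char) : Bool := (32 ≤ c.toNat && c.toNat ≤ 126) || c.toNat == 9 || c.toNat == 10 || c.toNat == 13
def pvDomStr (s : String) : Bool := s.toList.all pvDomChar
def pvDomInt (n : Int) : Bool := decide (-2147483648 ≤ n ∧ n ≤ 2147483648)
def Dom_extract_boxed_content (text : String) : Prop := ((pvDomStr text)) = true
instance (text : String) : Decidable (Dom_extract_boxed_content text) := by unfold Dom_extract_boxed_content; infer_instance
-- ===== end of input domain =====

-- B replaces A's find-marker-then-inner-brace-matching-loop structure by a single
-- left-to-right state-machine pass (brace-depth counter + content buffer); same result, same O(n) cost.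

-- ===== PORT A =====
def pvMarker : List Char := ['\\', 'b', 'o', 'x', 'e', 'd', '{']

-- tiny termination facts, named so the recursive defs cite them (keeps the defs' proof terms small)
lemma pvSubLt (n e : Nat) (h : e < n) : n - (e + 1) < n - e := by omega

lemma pvDropLt (c : Char) (rest : List Char) (k : Nat) :
    (List.drop (k + 1) (c :: rest)).length < (c :: rest).length := by
  simp

lemma pvTailLt (c : Char) (rest : List Char) : rest.length < (c :: rest).length := by simp

-- A's inner while loop: from (brace_level, brace_end) = (level, e) to its final value
def pvAInner (l : List Char) (level : Int) (e : Nat) : Int × Nat :=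
  if _h : 0 < level ∧ e < l.length then
    -- text[brace_end]: in range by the loop guard, so getD is exact
    let c := l.getD e ' '
    pvAInner l (if c = '{' then level + 1 else if c = '}' then level - 1 else level) (e + 1)
  else (level, e)
termination_by l.length - e
decreasing_by exact pvSubLt l.length e _h.2

-- needed by pvALoop's termination proof (cited in its decreasing_by)
lemma pvAInner_ge (l : List Char) (level : Int) (e : Nat) : e ≤ (pvAInner l level e).2 := by
  fun_induction pvAInner with
  | case1 level e h c ih => simp only [dite_eq_ite] at ih ⊢; omega
  | case2 level e h => simp

-- needed by pvALoop's termination proof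
def pvAFindGe (l : List Char) (i : Nat) (hi : i ≤ l.length)
    (h : PySem.Chars.findFrom l pvMarker (i : Int) none ≠ -1) :
    (i : Int) ≤ PySem.Chars.findFrom l pvMarker (i : Int) none :=
  (PySem.Chars.findFrom_natCast_spec l pvMarker i hi h).1

-- needed by pvALoop's termination proof (cited in its decreasing_by)
lemma pvALoopDec (l : List Char) (i : Nat) (hi : i < l.length)
    (hbs : ¬ PySem.Chars.findFrom l pvMarker (i : Int) none = -1) :
    l.length - (pvAInner l 1 ((PySem.Chars.findFrom l pvMarker (i : Int) none).toNat + 7)).2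
      < l.length - i := by
  have h1 := pvAFindGe l i (by omega) hbs
  have h2 := pvAInner_ge l 1 ((PySem.Chars.findFrom l pvMarker (i : Int) none).toNat + 7)
  omega

-- A's outer while loop over i, accumulating `results`
def pvALoop (l : List Char) (i : Nat) (results : List String) : List String :=
  if _hi : i < l.length then
    let bs := PySem.Chars.findFrom l pvMarker (i : Int) none
    if hbs : bs = -1 then results
    else
      let braceStart := bs.toNat + 7
      let r := pvAInner l 1 braceStart
      let results' :=
        if r.1 = 0 then
          results ++ [String.ofList (PySem.List.slice l (some (braceStart : Int)) (some ((r.2 : Int) - 1)))]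
        else results
      pvALoop l r.2 results'
  else results
termination_by l.length - i
decreasing_by exact pvALoopDec l i _hi hbs

def extract_boxed_content (text : String) : List String :=
  pvALoop text.toList 0 []

-- ===== PORT B =====
-- B's single pass: depth = 0 means "outside any box"; buf holds the current box's content
def pvBScan (l : List Char) (depth : Int) (buf : List Char) : List String :=
  match l with
  | [] => []
  | c :: rest =>
    if depth = 0 then
      if pvMarker.isPrefixOf (c :: rest) then pvBScan ((c :: rest).drop 7) 1 []
      else pvBScan rest 0 buf
    else
      let d := if c = '{' then depth + 1 else if c = '}' then depth - 1 else depth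
      if d = 0 then String.ofList buf :: pvBScan rest 0 buf
      else pvBScan rest d (buf ++ [c])
termination_by l.length
decreasing_by
  · exact pvDropLt c rest 6
  · exact pvTailLt c rest
  · exact pvTailLt c rest
  · exact pvTailLt c rest

def extract_boxed_content_alt (text : String) : List String :=
  pvBScan text.toList 0 []

-- ===== PRECONDITION & SPEC =====
def Spec_extract_boxed_content (text : String) (out : List String) : Prop := out = extract_boxed_content_alt text
instance (text : String) (out : List String) : Decidable (Spec_extract_boxed_content text out) := by unfold Spec_extract_boxed_content; infer_instance

-- ===== CLAIM (what is proved, stated in full; the proofs are below) =====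
def Claim_equal_extract_boxed_content : Prop := ∀ (text : String), Dom_extract_boxed_content text → Spec_extract_boxed_content text (extract_boxed_content text)

-- ===== LEMMAS AND PROOFS =====
lemma pvAInner_le (l : List Char) (level : Int) (e : Nat) (he : e ≤ l.length) :
    (pvAInner l level e).2 ≤ l.length := by
  fun_induction pvAInner with
  | case1 level e h c ih => exact ih (by omega)
  | case2 level e h => simpa

lemma pvAInner_exhaust (l : List Char) (level : Int) (e : Nat) (h0 : 0 ≤ level)
    (h : (pvAInner l level e).1 ≠ 0) : l.length ≤ (pvAInner l level e).2 := by
  fun_induction pvAInner with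
  | case1 level e h c ih =>
      simp only [dite_eq_ite] at ih h ⊢
      apply ih _ h
      split_ifs <;> omega
  | case2 level e h2 =>
      simp only at h ⊢
      omega

lemma pvAInner_pos (l : List Char) (level : Int) (e : Nat) (h0 : 0 < level)
    (h : (pvAInner l level e).1 = 0) : e < (pvAInner l level e).2 := by
  fun_induction pvAInner with
  | case1 level e hh c ih =>
      simp only [dite_eq_ite] at ih h ⊢
      have hge := pvAInner_ge l (if c = '{' then level + 1 else if c = '}' then level - 1 else level) (e + 1)
      omega
  | case2 level e hh =>
      simp only at h
      omega

-- pvBScan with depth 0 never reads buf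
lemma pvBScan_buf (l : List Char) : ∀ buf buf', pvBScan l 0 buf = pvBScan l 0 buf' := by
  induction l with
  | nil => intro buf buf'; simp [pvBScan]
  | cons c rest ih =>
      intro buf buf'
      by_cases hp : pvMarker.isPrefixOf (c :: rest)
      · simp [pvBScan, hp]
      · simp [pvBScan, hp]; exact ih buf buf'

-- outside a box, pvBScan skips past any marker-free stretch
lemma pvBScan_skip (l : List Char) : ∀ (m : Nat) (buf : List Char), m ≤ l.length →
    (∀ j < m, ¬ pvMarker <+: l.drop j) → pvBScan l 0 buf = pvBScan (l.drop m) 0 buf := by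
  induction l with
  | nil => intro m buf hm _; simp_all
  | cons c rest ih =>
      intro m buf hm hj
      match m with
      | 0 => rfl
      | m + 1 =>
        have h0 : ¬ pvMarker <+: (c :: rest) := hj 0 (by omega)
        have hp : pvMarker.isPrefixOf (c :: rest) = false := by
          rw [Bool.eq_false_iff]
          simp [List.isPrefixOf_iff_prefix, h0]
        rw [show (c :: rest).drop (m+1) = rest.drop m from rfl]
        conv_lhs => rw [pvBScan]
        simp only [hp, Bool.false_eq_true, if_false]
        exact ih m buf (by simpa using hm) (fun j hjm => hj (j+1) (by omega))

lemma pvBScan_none (l : List Char) (buf : List Char)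
    (h : ∀ j, ¬ pvMarker <+: l.drop j) : pvBScan l 0 buf = [] := by
  rw [pvBScan_skip l l.length buf le_rfl (fun j _ => h j)]
  simp [pvBScan]

lemma pvInside_base (l : List Char) (e : Nat) (lev : Int) (buf : List Char)
    (he : l.length ≤ e) (hlev : 0 < lev) :
    pvBScan (l.drop e) lev buf =
      if (pvAInner l lev e).1 = 0 then
        String.ofList (buf ++ (l.drop e).take ((pvAInner l lev e).2 - 1 - e))
          :: pvBScan (l.drop (pvAInner l lev e).2) 0 []
      else [] := by
  have hA : pvAInner l lev e = (lev, e) := by rw [pvAInner, dif_neg (by omega)]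
  rw [List.drop_eq_nil_of_le he, hA]
  simp [pvBScan, hlev.ne']

-- inside a box: B's depth/buf pass computes exactly what A's inner brace-matching loop does
lemma pvInside (l : List Char) : ∀ (n e : Nat) (lev : Int) (buf : List Char),
    l.length - e ≤ n → 0 < lev →
    pvBScan (l.drop e) lev buf =
      if (pvAInner l lev e).1 = 0 then
        String.ofList (buf ++ (l.drop e).take ((pvAInner l lev e).2 - 1 - e))
          :: pvBScan (l.drop (pvAInner l lev e).2) 0 []
      else [] := by
  intro n
  induction n with
  | zero =>
      intro e lev buf hn hlev
      exact pvInside_base l e lev buf (by omega) hlev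
  | succ n ih =>
      intro e lev buf hn hlev
      by_cases he : e < l.length
      · have hdrop : l.drop e = l[e] :: l.drop (e+1) := List.drop_eq_getElem_cons he
        have hc : l.getD e ' ' = l[e] := List.getD_eq_getElem l ' ' he
        have hA : pvAInner l lev e
            = pvAInner l (if l[e] = '{' then lev + 1 else if l[e] = '}' then lev - 1 else lev) (e+1) := by
          conv_lhs => rw [pvAInner]
          rw [dif_pos ⟨hlev, he⟩]
          rw [hc]
        set d := (if l[e] = '{' then lev + 1 else if l[e] = '}' then lev - 1 else lev) with hd
        have hdnn : 0 ≤ d := by rw [hd]; split_ifs <;> omega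
        have hBstep : pvBScan (l.drop e) lev buf
            = if d = 0 then String.ofList buf :: pvBScan (l.drop (e+1)) 0 buf
              else pvBScan (l.drop (e+1)) d (buf ++ [l[e]]) := by
          rw [hdrop]
          conv_lhs => rw [pvBScan]
          rw [if_neg hlev.ne']
        by_cases hd0 : d = 0
        · have hA2 : pvAInner l d (e+1) = (0, e+1) := by
            rw [pvAInner, dif_neg (by omega)]
            rw [hd0]
          rw [hBstep, if_pos hd0, hA, hA2]
          simp only [if_pos rfl]
          rw [hdrop]
          simp [pvBScan_buf (l.drop (e+1)) buf []]
        · have hdpos : 0 < d := by omega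
          rw [hBstep, if_neg hd0, ih (e+1) d (buf ++ [l[e]]) (by omega) hdpos, hA]
          by_cases hz : (pvAInner l d (e+1)).1 = 0
          · have hpos : e+1 < (pvAInner l d (e+1)).2 := pvAInner_pos l d (e+1) hdpos hz
            rw [if_pos hz, if_pos hz, hdrop]
            have harith : (pvAInner l d (e+1)).2 - 1 - e = ((pvAInner l d (e+1)).2 - 1 - (e+1)) + 1 := by
              omega
            rw [harith, List.take_succ_cons]
            simp
          · rw [if_neg hz, if_neg hz]
      · exact pvInside_base l e lev buf (by omega) hlev

lemma pvPrefDropNot (s : List Char) (h : ¬ pvMarker <:+: s) (j : Nat) :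
    ¬ pvMarker <+: s.drop j := fun hp => h (hp.isInfix.trans (s.drop_suffix j).isInfix)

-- main loop invariant: A's outer loop from position i = results so far ++ B's scan of the rest
lemma pvMain (l : List Char) : ∀ (n i : Nat) (results : List String) (buf : List Char),
    l.length - i ≤ n → i ≤ l.length →
    pvALoop l i results = results ++ pvBScan (l.drop i) 0 buf := by
  intro n
  induction n with
  | zero =>
      intro i results buf hn hil
      have : i = l.length := by omega
      subst this
      rw [pvALoop, dif_neg (by omega)]
      simp [List.drop_length, pvBScan]
  | succ n ih =>
      intro i results buf hn hil
      by_cases hi : i < l.length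
      case neg =>
        have : i = l.length := by omega
        subst this
        rw [pvALoop, dif_neg (by omega)]
        simp [List.drop_length, pvBScan]
      rw [pvALoop]
      simp only [dif_pos hi]
      by_cases hbs : PySem.Chars.findFrom l pvMarker (i : Int) none = -1
      · rw [dif_pos hbs]
        have hno : ¬ pvMarker <:+: l.drop i := by
          rw [← PySem.Chars.findFrom_natCast_eq_neg_one_iff l pvMarker i (le_of_lt hi)]
          exact hbs
        rw [pvBScan_none (l.drop i) buf (pvPrefDropNot _ hno)]
        simp
      · rw [dif_neg hbs]
        obtain ⟨hFi, hFpre, hFmin⟩ :=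
          PySem.Chars.findFrom_natCast_spec l pvMarker i (le_of_lt hi) hbs
        set F := PySem.Chars.findFrom l pvMarker (i : Int) none with hF
        have hip : i ≤ F.toNat := by omega
        have hlen7 : F.toNat + 7 ≤ l.length := by
          have := hFpre.length_le
          simp [pvMarker] at this
          omega
        -- B side: skip to the first occurrence of the marker, then enter the box
        have hskip : pvBScan (l.drop i) 0 buf = pvBScan (l.drop F.toNat) 0 buf := by
          rw [pvBScan_skip (l.drop i) (F.toNat - i) buf (by simp; omega)
              (fun j hj => by
                rw [List.drop_drop]
                exact hFmin (i + j) (by omega) (by omega))]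
          rw [List.drop_drop, show i + (F.toNat - i) = F.toNat by omega]
        have hpcons : l.drop F.toNat = l[F.toNat]'(by omega) :: l.drop (F.toNat + 1) :=
          List.drop_eq_getElem_cons (by omega)
        have henter : pvBScan (l.drop F.toNat) 0 buf = pvBScan (l.drop (F.toNat + 7)) 1 [] := by
          conv_lhs => rw [hpcons, pvBScan]
          rw [if_pos rfl, if_pos (by rw [List.isPrefixOf_iff_prefix, ← hpcons]; exact hFpre)]
          rw [← hpcons, List.drop_drop]
        have hinside := pvInside l (l.length - (F.toNat + 7)) (F.toNat + 7) 1 [] le_rfl Int.one_pos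
        set r := pvAInner l 1 (F.toNat + 7) with hr
        have hge := pvAInner_ge l 1 (F.toNat + 7)
        have hle : r.2 ≤ l.length := pvAInner_le l 1 (F.toNat + 7) (by omega)
        rw [hskip, henter, hinside]
        by_cases hz : r.1 = 0
        · have hpos : F.toNat + 7 < r.2 := pvAInner_pos l 1 (F.toNat + 7) Int.one_pos hz
          rw [if_pos hz, if_pos hz, ih r.2 _ [] (by omega) hle]
          have hcast : ((r.2 : Int) - 1) = (((r.2 - 1 : Nat) : Int)) := by omega
          rw [hcast, PySem.List.slice_natCast]
          simp
        · have hexh : l.length ≤ r.2 := pvAInner_exhaust l 1 (F.toNat + 7) (by omega) hz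
          rw [if_neg hz, if_neg hz, ih r.2 _ buf (by omega) hle]
          rw [show r.2 = l.length by omega]
          simp [List.drop_length, pvBScan]

-- ===== VERDICT (by name: the statement is the Claim_ definition above) =====
theorem extract_boxed_content_spec : Claim_equal_extract_boxed_content := by
  intro text _
  unfold Spec_extract_boxed_content extract_boxed_content extract_boxed_content_alt
  rw [pvMain text.toList text.toList.length 0 [] [] (by omega) (by omega)]
  simp
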